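-- pv_equiv track=rewrite | github.com/edevog/bioinformatics-algorithms | find_the_longest_path/longestPath.py | makeInDict
-- ===== SOURCE A (Python) =====
-- def makeInDict(out_dict):
--     '''
--     Makes an input dictionary using the existing dictionary
--     of outputs (matchDict)
--     '''
--     in_dict = {}
--     unique = []
--     #iterate through each node in the output dictionary,
--     for key in out_dict:
--         #iterate through each output of the node
--         for i in range(len(out_dict[key][0])):
--             #set the input node as the ith output node
--             n_in = out_dict[key][0][i]
--             #set the input node's weight as the ith weight of the
--             #output node
--             wt = out_dict[key][1][i]
--             #if the input node is not already in the dictionary,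
--             if n_in not in in_dict:
--                 unique.append(n_in)
--                 #create a new key as the input node and the values as the
--                 #key from the output dictionary and the input node's weight
--                 in_dict[n_in] = [[key], [wt]]
--             #if the input node is already in the dictionary,
--             else:
--                 #append the key from the output dictionary and the
--                 #input node's weight to the existing list
--                 in_dict[n_in][0].append(key)
--                 in_dict[n_in][1].append(wt)
--         #after iterating through all the output nodes check if any nodes in
--         #the output dictionary are not in the input dictionary and add
--         #any missing nodes so the input dictionary contains all nodes in
--         #the graph
--         if key not in in_dict:
--             in_dict[key] = [[],[]]
--     return in_dict
-- ===== SOURCE B (Python) =====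
-- def makeInDict(out_dict):
--     '''
--     Makes an input dictionary using the existing dictionary
--     of outputs (matchDict)
--     '''
--     # Pass 1: register every node of the graph (each key's output nodes,
--     # then the key itself) with an empty [[], []] slot, in first-seen order.
--     in_dict = {}
--     for key in out_dict:
--         for n in out_dict[key][0]:
--             in_dict.setdefault(n, [[], []])
--         in_dict.setdefault(key, [[], []])
--     # Pass 2: every slot already exists, so append unconditionally.
--     for key in out_dict:
--         v = out_dict[key]
--         for i, n in enumerate(v[0]):
--             in_dict[n][0].append(key)
--             in_dict[n][1].append(v[1][i])
--     return in_dict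
-- ===== Notes on version B (the rewrite author's own statement) =====
-- stated objective: simpler
-- what changed: B replaces A's single pass with a per-edge membership branch (insert-or-append plus a trailing missing-key fixup) by two plain passes: first register every node with an empty slot in the same first-seen order, then append source keys and weights unconditionally over enumerate(outputs); the unused 'unique' list is dropped.
import Mathlib
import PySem

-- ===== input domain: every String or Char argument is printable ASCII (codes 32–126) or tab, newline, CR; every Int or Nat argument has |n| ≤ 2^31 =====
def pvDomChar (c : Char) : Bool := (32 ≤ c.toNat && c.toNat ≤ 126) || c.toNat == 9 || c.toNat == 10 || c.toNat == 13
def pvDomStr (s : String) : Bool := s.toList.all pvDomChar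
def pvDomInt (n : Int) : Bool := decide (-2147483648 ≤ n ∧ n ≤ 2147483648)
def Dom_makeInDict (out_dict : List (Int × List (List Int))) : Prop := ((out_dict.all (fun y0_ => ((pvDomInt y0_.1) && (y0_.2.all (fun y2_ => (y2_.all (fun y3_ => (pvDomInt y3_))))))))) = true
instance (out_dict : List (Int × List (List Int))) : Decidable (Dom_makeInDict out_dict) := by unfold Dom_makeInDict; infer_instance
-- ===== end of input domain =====

-- B inverts the adjacency dict in two plain passes (register every node with an empty slot,
-- then append unconditionally) instead of A's single pass with a membership branch per edge;
-- objective: simpler (same O(V+E) cost; A's unused `unique` list is dropped).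

-- ===== PORT A =====
-- literal port of A: one pass; per edge, branch on membership (insert [[key],[wt]] vs append);
-- after each key's edges, add the key itself if missing.  A's `unique` list never affects the
-- return value and is omitted.
def aInner (key : Int) (outs wts : List Int)
    (d : PySem.Dict Int (List (List Int))) : PySem.Dict Int (List (List Int)) :=
  (PySem.List.pyRange 0 (PySem.List.len outs) 1).foldl (fun d i =>
    let n_in := PySem.List.pyGetD outs i 0
    let wt := PySem.List.pyGetD wts i 0
    if d.contains n_in = false then d.insert n_in [[key], [wt]]
    else d.modify n_in [[], []]
      (fun l => [PySem.List.pyGetD l 0 [] ++ [key], PySem.List.pyGetD l 1 [] ++ [wt]])) d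

def aStep (d : PySem.Dict Int (List (List Int))) (e : Int × List (List Int)) :
    PySem.Dict Int (List (List Int)) :=
  let d := aInner e.1 (PySem.List.pyGetD e.2 0 []) (PySem.List.pyGetD e.2 1 []) d
  if d.contains e.1 = false then d.insert e.1 [[], []] else d

def makeInDict (out_dict : List (Int × List (List Int))) : List (Int × List (List Int)) :=
  (out_dict.foldl aStep PySem.Dict.empty).items

-- ===== PORT B =====
-- pass 1: every node (outputs of a key, then the key) gets an empty slot, first-seen order
def bFill (d : PySem.Dict Int (List (List Int))) (e : Int × List (List Int)) :
    PySem.Dict Int (List (List Int)) :=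
  ((PySem.List.pyGetD e.2 0 []).foldl (fun d n => d.setdefault n [[], []]) d).setdefault e.1 [[], []]

-- pass 2: all slots exist, append unconditionally over enumerate(v[0]), reading v[1][i]
-- (in_dict[n][0].append/… is ported as Dict.modify; inside Pre_ the key n is always present
-- and i is a valid index of v[1], so the pyGetD defaults are never taken)
def bLink (d : PySem.Dict Int (List (List Int))) (e : Int × List (List Int)) :
    PySem.Dict Int (List (List Int)) :=
  (PySem.List.enumerate (PySem.List.pyGetD e.2 0 [])).foldl (fun d p =>
    d.modify p.2 [[], []]
      (fun l => [PySem.List.pyGetD l 0 [] ++ [e.1],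
                 PySem.List.pyGetD l 1 [] ++ [PySem.List.pyGetD (PySem.List.pyGetD e.2 1 []) p.1 0]])) d

def makeInDict_alt (out_dict : List (Int × List (List Int))) : List (Int × List (List Int)) :=
  (out_dict.foldl bLink (out_dict.foldl bFill PySem.Dict.empty)).items

-- ===== PRECONDITION & SPEC =====
-- Pre_ is exactly the set of inputs on which A returns: on each value A raises IndexError when
-- the value list is empty (v[0] fails) or when some output index has no matching weight
-- (v[1][i] fails); B raises IndexError on exactly the same inputs.
def Pre_makeInDict (out_dict : List (Int × List (List Int))) : Prop :=
  ∀ e ∈ out_dict, 1 ≤ e.2.length ∧ (e.2.getD 0 []).length ≤ (e.2.getD 1 []).length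
instance (out_dict : List (Int × List (List Int))) : Decidable (Pre_makeInDict out_dict) := by
  unfold Pre_makeInDict; infer_instance

def pvWitness_makeInDict : (List (Int × List (List Int))) := [(0, [[1, 2], [7, 9]]), (1, [[]])]

def Spec_makeInDict (out_dict : List (Int × List (List Int))) (out : List (Int × List (List Int))) : Prop := out = makeInDict_alt out_dict
instance (out_dict : List (Int × List (List Int))) (out : List (Int × List (List Int))) : Decidable (Spec_makeInDict out_dict out) := by unfold Spec_makeInDict; infer_instance

-- ===== CLAIM (what is proved, stated in full; the proofs are below) =====
def Claim_equal_makeInDict : Prop := ∀ (out_dict : List (Int × List (List Int))), Dom_makeInDict out_dict → Pre_makeInDict out_dict → Spec_makeInDict out_dict (makeInDict out_dict)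

-- ===== LEMMAS AND PROOFS =====

lemma foldl_range_getD_zip {β : Type} (f : β → Int → Int → β) :
    ∀ (outs wts : List Int) (init : β), outs.length ≤ wts.length →
      (List.range outs.length).foldl (fun d i => f d (outs.getD i 0) (wts.getD i 0)) init
        = (outs.zip wts).foldl (fun d p => f d p.1 p.2) init := by
  intro outs
  induction outs with
  | nil => intro wts init _; simp
  | cons o os ih =>
    intro wts init h
    cases wts with
    | nil => simp at h
    | cons w ws =>
      simp only [List.length_cons, List.range_succ_eq_map, List.foldl_cons, List.foldl_map,
        List.getD_cons_zero, List.zip_cons_cons]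
      simpa using ih ws (f init o w) (by simpa using h)

lemma foldl_pyRange_getD_zip {β : Type} (f : β → Int → Int → β)
    (outs wts : List Int) (init : β) (h : outs.length ≤ wts.length) :
    (PySem.List.pyRange 0 (PySem.List.len outs) 1).foldl
        (fun d i => f d (PySem.List.pyGetD outs i 0) (PySem.List.pyGetD wts i 0)) init
      = (outs.zip wts).foldl (fun d p => f d p.1 p.2) init := by
  rw [PySem.List.len_eq, show ((1 : Int)) = (1 : Int) from rfl]
  rw [show PySem.List.pyRange 0 (↑outs.length) 1 = PySem.List.pyRange 0 (↑outs.length) from rfl]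
  rw [PySem.List.pyRange_zero_natCast, List.foldl_map]
  simpa [PySem.List.pyGetD_natCast] using foldl_range_getD_zip f outs wts init h

def linkF (k : Int) (d : PySem.Dict Int (List (List Int))) (p : Int × Int) :
    PySem.Dict Int (List (List Int)) :=
  d.modify p.1 [[], []]
    (fun l => [PySem.List.pyGetD l 0 [] ++ [k], PySem.List.pyGetD l 1 [] ++ [p.2]])

lemma step_eq_linkF (key : Int) (d : PySem.Dict Int (List (List Int))) (n w : Int) :
    (if d.contains n = false then d.insert n [[key], [w]]
     else d.modify n [[], []]
       (fun l => [PySem.List.pyGetD l 0 [] ++ [key], PySem.List.pyGetD l 1 [] ++ [w]]))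
      = linkF key d (n, w) := by
  by_cases h : d.contains n = false
  · simp [h, linkF, PySem.Dict.modify, PySem.Dict.getD_of_not_contains d _ h,
      PySem.List.pyGetD, PySem.List.pyGet?, PySem.List.pyIdx?]
  · simp [h, linkF]

lemma aInner_eq_link (key : Int) (outs wts : List Int) (h : outs.length ≤ wts.length)
    (d : PySem.Dict Int (List (List Int))) :
    aInner key outs wts d = (outs.zip wts).foldl (linkF key) d := by
  unfold aInner
  rw [foldl_pyRange_getD_zip
    (fun d n w => if d.contains n = false then d.insert n [[key], [w]]
      else d.modify n [[], []]
        (fun l => [PySem.List.pyGetD l 0 [] ++ [key], PySem.List.pyGetD l 1 [] ++ [w]]))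
    outs wts d h]
  exact PySem.List.foldl_congr_mem _ _ _ d (fun acc p _ => step_eq_linkF key acc p.1 p.2)

def extV (v : List (List Int)) (ks ws : List Int) : List (List Int) :=
  [PySem.List.pyGetD v 0 [] ++ ks, PySem.List.pyGetD v 1 [] ++ ws]

def shapely (d : PySem.Dict Int (List (List Int))) : Prop :=
  ∀ n, ∃ a b, d.getD n [[], []] = [a, b]

lemma extV_extV (v : List (List Int)) (a b c d : List Int) :
    extV (extV v a b) c d = extV v (a ++ c) (b ++ d) := by
  simp [extV, PySem.List.pyGetD, PySem.List.pyGet?, PySem.List.pyIdx?]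

lemma extV_nil_nil (v : List (List Int)) (a b : List Int) (h : v = [a, b]) :
    extV v [] [] = v := by
  subst h; simp [extV, PySem.List.pyGetD, PySem.List.pyGet?, PySem.List.pyIdx?]

lemma getD_linkF (k : Int) (d : PySem.Dict Int (List (List Int))) (p : Int × Int) (n : Int) :
    (linkF k d p).getD n [[], []]
      = if n = p.1 then extV (d.getD n [[], []]) [k] [p.2] else d.getD n [[], []] := by
  unfold linkF
  rw [PySem.Dict.getD_modify]
  split_ifs with h
  · subst h; rfl
  · rfl

lemma shapely_linkF (k : Int) (d : PySem.Dict Int (List (List Int))) (p : Int × Int)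
    (hd : shapely d) : shapely (linkF k d p) := by
  intro n
  rw [getD_linkF]
  split_ifs
  · exact ⟨_, _, rfl⟩
  · exact hd n

lemma shapely_link_foldl (k : Int) (L : List (Int × Int)) :
    ∀ (d : PySem.Dict Int (List (List Int))), shapely d → shapely (L.foldl (linkF k) d) := by
  induction L with
  | nil => intro d hd; exact hd
  | cons p L ih => intro d hd; exact ih _ (shapely_linkF k d p hd)

lemma link_getD (k : Int) (L : List (Int × Int)) :
    ∀ (d : PySem.Dict Int (List (List Int))), shapely d → ∀ n,
      (L.foldl (linkF k) d).getD n [[], []]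
        = extV (d.getD n [[], []]) ((L.filter (fun p => p.1 == n)).map (fun _ => k))
            ((L.filter (fun p => p.1 == n)).map (·.2)) := by
  induction L with
  | nil =>
    intro d hd n
    obtain ⟨a, b, hab⟩ := hd n
    simpa using (extV_nil_nil _ a b hab).symm
  | cons p L ih =>
    intro d hd n
    simp only [List.foldl_cons, List.filter_cons]
    by_cases hp : p.1 = n
    · simp only [hp, beq_self_eq_true, if_pos, List.map_cons]
      rw [ih _ (shapely_linkF k d p hd) n, getD_linkF, if_pos hp.symm, extV_extV]
      simp
    · have hb : (p.1 == n) = false := by simpa using hp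
      simp only [hb, Bool.false_eq_true, if_false]
      rw [ih _ (shapely_linkF k d p hd) n, getD_linkF, if_neg (fun h => hp h.symm)]

lemma link_keys (k : Int) (L : List (Int × Int)) (d : PySem.Dict Int (List (List Int))) :
    (L.foldl (linkF k) d).keys = PySem.Set.update d.keys (L.map Prod.fst) := by
  exact PySem.Dict.keys_foldl_modify_key L Prod.fst [[], []]
    (fun d p => (fun l => [PySem.List.pyGetD l 0 [] ++ [k], PySem.List.pyGetD l 1 [] ++ [p.2]])) d

lemma pyGetD_one (v : List (List Int)) :
    PySem.List.pyGetD v 1 [] = v.getD 1 [] := by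
  match v with
  | [] => rfl
  | [a] => rfl
  | a :: b :: t => simp [PySem.List.pyGetD, PySem.List.pyGet?, PySem.List.pyIdx?]

lemma setdefault_getD (d : PySem.Dict Int (List (List Int))) (m n : Int) :
    (d.setdefault m [[], []]).getD n [[], []] = d.getD n [[], []] := by
  by_cases h : n = m
  · subst h; exact PySem.Dict.getD_setdefault_self d n [[], []] [[], []]
  · rw [PySem.Dict.getD_eq_get?_getD, PySem.Dict.get?_setdefault_of_ne d _ h,
      ← PySem.Dict.getD_eq_get?_getD]

lemma keys_setdefault_add (d : PySem.Dict Int (List (List Int))) (m : Int) :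
    (d.setdefault m [[], []]).keys = PySem.Set.add d.keys m := by
  rw [PySem.Dict.keys_setdefault, PySem.Set.add_eq_ite]
  by_cases h : m ∈ d.keys
  · rw [if_pos ((PySem.Dict.contains_iff_mem_keys d m).mpr h), if_pos h]
  · rw [if_neg (by simpa using (fun hc => h ((PySem.Dict.contains_iff_mem_keys d m).mp hc))),
      if_neg h]

lemma fill_getD (outs : List Int) :
    ∀ (d : PySem.Dict Int (List (List Int))) (n : Int),
      (outs.foldl (fun d n => d.setdefault n [[], []]) d).getD n [[], []] = d.getD n [[], []] := by
  induction outs with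
  | nil => intro d n; rfl
  | cons o os ih => intro d n; rw [List.foldl_cons, ih, setdefault_getD]

lemma fill_keys (outs : List Int) :
    ∀ (d : PySem.Dict Int (List (List Int))),
      (outs.foldl (fun d n => d.setdefault n [[], []]) d).keys = PySem.Set.update d.keys outs := by
  induction outs with
  | nil => intro d; simp [PySem.Set.update_nil]
  | cons o os ih =>
    intro d
    rw [List.foldl_cons, ih, PySem.Set.update_cons, keys_setdefault_add]

def zipE (e : Int × List (List Int)) : List (Int × Int) :=
  (PySem.List.pyGetD e.2 0 []).zip (PySem.List.pyGetD e.2 1 [])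

def ksE (e : Int × List (List Int)) (n : Int) : List Int :=
  ((zipE e).filter (fun p => p.1 == n)).map (fun _ => e.1)

def wsE (e : Int × List (List Int)) (n : Int) : List Int :=
  ((zipE e).filter (fun p => p.1 == n)).map (·.2)

def streamE (e : Int × List (List Int)) : List Int :=
  PySem.List.pyGetD e.2 0 [] ++ [e.1]

def preE (e : Int × List (List Int)) : Prop :=
  1 ≤ e.2.length ∧ (e.2.getD 0 []).length ≤ (e.2.getD 1 []).length

lemma preE_lens {e : Int × List (List Int)} (h : preE e) :
    (PySem.List.pyGetD e.2 0 []).length ≤ (PySem.List.pyGetD e.2 1 []).length := by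
  rw [PySem.List.pyGetD_zero, pyGetD_one]; exact h.2

lemma bLink_eq_link (d : PySem.Dict Int (List (List Int))) (e : Int × List (List Int))
    (he : preE e) : bLink d e = (zipE e).foldl (linkF e.1) d := by
  unfold bLink
  rw [PySem.List.enumerate_eq_map_pyRange (PySem.List.pyGetD e.2 0 []) (0 : Int),
    List.foldl_map]
  exact foldl_pyRange_getD_zip (fun d n w => linkF e.1 d (n, w))
    (PySem.List.pyGetD e.2 0 []) (PySem.List.pyGetD e.2 1 []) d (preE_lens he)
-- the trailing "if key not in in_dict: in_dict[key] = [[],[]]" never changes getD (default [[],[]])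

lemma trail_getD (d : PySem.Dict Int (List (List Int))) (k n : Int) :
    (if d.contains k = false then d.insert k [[], []] else d).getD n [[], []]
      = d.getD n [[], []] := by
  split_ifs with h
  · rw [PySem.Dict.getD_insert]
    split_ifs with hn
    · subst hn; exact (PySem.Dict.getD_of_not_contains d _ h).symm
    · rfl
  · rfl

lemma trail_keys (d : PySem.Dict Int (List (List Int))) (k : Int) :
    (if d.contains k = false then d.insert k [[], []] else d).keys
      = PySem.Set.add d.keys k := by
  rw [PySem.Set.add_eq_ite]
  by_cases h : d.contains k = false
  · rw [if_pos h, if_neg (fun hm => by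
      have := (PySem.Dict.contains_iff_mem_keys d k).mpr hm; rw [h] at this; exact absurd this (by simp)),
      PySem.Dict.keys_insert_of_not_contains d _ h]
  · rw [if_neg h, if_pos ((PySem.Dict.contains_iff_mem_keys d k).mp (by simpa using h))]

lemma aStep_getD (d : PySem.Dict Int (List (List Int))) (e : Int × List (List Int))
    (he : preE e) (hd : shapely d) (n : Int) :
    (aStep d e).getD n [[], []] = extV (d.getD n [[], []]) (ksE e n) (wsE e n) := by
  unfold aStep
  rw [trail_getD, aInner_eq_link e.1 _ _ (preE_lens he) d]
  exact link_getD e.1 (zipE e) d hd n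

lemma shapely_trail (d : PySem.Dict Int (List (List Int))) (k : Int) (hd : shapely d) :
    shapely (if d.contains k = false then d.insert k [[], []] else d) := by
  intro n; rw [trail_getD]; exact hd n

lemma shapely_aStep (d : PySem.Dict Int (List (List Int))) (e : Int × List (List Int))
    (he : preE e) (hd : shapely d) : shapely (aStep d e) := by
  unfold aStep
  exact shapely_trail _ _ (by
    rw [aInner_eq_link e.1 _ _ (preE_lens he) d]
    exact shapely_link_foldl e.1 (zipE e) d hd)

lemma aStep_keys (d : PySem.Dict Int (List (List Int))) (e : Int × List (List Int))
    (he : preE e) :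
    (aStep d e).keys = PySem.Set.update d.keys (streamE e) := by
  unfold aStep
  rw [trail_keys, aInner_eq_link e.1 _ _ (preE_lens he) d, link_keys, streamE,
    PySem.Set.update_append, List.map_fst_zip (preE_lens he)]
  simp [PySem.Set.update_cons, PySem.Set.update_nil]

lemma bFill_getD (d : PySem.Dict Int (List (List Int))) (e : Int × List (List Int)) (n : Int) :
    (bFill d e).getD n [[], []] = d.getD n [[], []] := by
  unfold bFill; rw [setdefault_getD, fill_getD]

lemma bFill_keys (d : PySem.Dict Int (List (List Int))) (e : Int × List (List Int)) :
    (bFill d e).keys = PySem.Set.update d.keys (streamE e) := by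
  unfold bFill
  rw [keys_setdefault_add, fill_keys, streamE, PySem.Set.update_append]
  simp [PySem.Set.update_cons, PySem.Set.update_nil]

def bigKs (l : List (Int × List (List Int))) (n : Int) : List Int :=
  l.flatMap (fun e => ksE e n)

def bigWs (l : List (Int × List (List Int))) (n : Int) : List Int :=
  l.flatMap (fun e => wsE e n)

def bigS (l : List (Int × List (List Int))) : List Int := l.flatMap streamE


lemma foldA_getD (l : List (Int × List (List Int))) :
    ∀ (d : PySem.Dict Int (List (List Int))), (∀ e ∈ l, preE e) → shapely d → ∀ n,
      (l.foldl aStep d).getD n [[], []]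
        = extV (d.getD n [[], []]) (bigKs l n) (bigWs l n) := by
  induction l with
  | nil =>
    intro d _ hd n
    obtain ⟨a, b, hab⟩ := hd n
    simpa [bigKs, bigWs] using (extV_nil_nil _ a b hab).symm
  | cons e l ih =>
    intro d hp hd n
    rw [List.foldl_cons, ih _ (fun e' he' => hp e' (List.mem_cons_of_mem e he'))
      (shapely_aStep d e (hp e List.mem_cons_self) hd) n,
      aStep_getD d e (hp e List.mem_cons_self) hd n, extV_extV]
    simp [bigKs, bigWs]

lemma foldA_keys (l : List (Int × List (List Int))) :
    ∀ (d : PySem.Dict Int (List (List Int))), (∀ e ∈ l, preE e) →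
      (l.foldl aStep d).keys = PySem.Set.update d.keys (bigS l) := by
  induction l with
  | nil => intro d _; simp [bigS, PySem.Set.update_nil]
  | cons e l ih =>
    intro d hp
    rw [List.foldl_cons, ih _ (fun e' he' => hp e' (List.mem_cons_of_mem e he')),
      aStep_keys d e (hp e List.mem_cons_self)]
    simp [bigS, PySem.Set.update_append]

lemma foldFill_getD (l : List (Int × List (List Int))) :
    ∀ (d : PySem.Dict Int (List (List Int))) (n : Int),
      (l.foldl bFill d).getD n [[], []] = d.getD n [[], []] := by
  induction l with
  | nil => intro d n; rfl
  | cons e l ih => intro d n; rw [List.foldl_cons, ih, bFill_getD]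

lemma foldFill_keys (l : List (Int × List (List Int))) :
    ∀ (d : PySem.Dict Int (List (List Int))),
      (l.foldl bFill d).keys = PySem.Set.update d.keys (bigS l) := by
  induction l with
  | nil => intro d; simp [bigS, PySem.Set.update_nil]
  | cons e l ih =>
    intro d
    rw [List.foldl_cons, ih, bFill_keys]
    simp [bigS, PySem.Set.update_append]


lemma foldLink_getD (l : List (Int × List (List Int))) :
    ∀ (d : PySem.Dict Int (List (List Int))), (∀ e ∈ l, preE e) → shapely d → ∀ n,
      (l.foldl bLink d).getD n [[], []]
        = extV (d.getD n [[], []]) (bigKs l n) (bigWs l n) := by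
  induction l with
  | nil =>
    intro d _ hd n
    obtain ⟨a, b, hab⟩ := hd n
    simpa [bigKs, bigWs] using (extV_nil_nil _ a b hab).symm
  | cons e l ih =>
    intro d hp hd n
    rw [List.foldl_cons,
      ih _ (fun e' he' => hp e' (List.mem_cons_of_mem e he'))
        (by rw [bLink_eq_link d e (hp e List.mem_cons_self)]
            exact shapely_link_foldl e.1 (zipE e) d hd) n,
      bLink_eq_link d e (hp e List.mem_cons_self), link_getD e.1 (zipE e) d hd n, extV_extV]
    simp [bigKs, bigWs, ksE, wsE]

lemma foldLink_keys (l : List (Int × List (List Int))) :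
    ∀ (d : PySem.Dict Int (List (List Int))), (∀ e ∈ l, preE e) →
      (∀ e ∈ l, ∀ x ∈ (zipE e).map Prod.fst, x ∈ d.keys) →
      (l.foldl bLink d).keys = d.keys := by
  induction l with
  | nil => intro d _ _; rfl
  | cons e l ih =>
    intro d hp hsub
    have hk : (bLink d e).keys = d.keys := by
      rw [bLink_eq_link d e (hp e List.mem_cons_self), link_keys,
        PySem.Set.update_eq_append_filter]
      have : List.filter (fun y => !PySem.Set.contains d.keys y)
          (PySem.Set.ofList ((zipE e).map Prod.fst)) = [] := by
        refine List.filter_eq_nil_iff.mpr (fun y hy => ?_)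
        have hmem : y ∈ d.keys := hsub e List.mem_cons_self y ((PySem.Set.mem_ofList _ _).mp hy)
        simpa using hmem
      rw [this, List.append_nil]
    rw [List.foldl_cons, ih _ (fun e' he' => hp e' (List.mem_cons_of_mem e he'))
      (fun e' he' x hx => by
        rw [hk]; exact hsub e' (List.mem_cons_of_mem e he') x hx), hk]

theorem final (out : List (Int × List (List Int))) (hp : ∀ e ∈ out, preE e) :
    makeInDict out = makeInDict_alt out := by
  unfold makeInDict makeInDict_alt
  have hsh0 : shapely PySem.Dict.empty := fun n => ⟨[], [], by simp [PySem.Dict.getD_empty]⟩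
  have hsh1 : shapely (out.foldl bFill PySem.Dict.empty) := fun n => by
    rw [foldFill_getD]; exact hsh0 n
  have hke : (PySem.Dict.empty (κ := Int) (ν := List (List Int))).keys = [] := rfl
  have hkA : (out.foldl aStep PySem.Dict.empty).keys = PySem.Set.ofList (bigS out) := by
    rw [foldA_keys out _ hp, hke, PySem.Set.update_nil_left]
  have hk1 : (out.foldl bFill PySem.Dict.empty).keys = PySem.Set.ofList (bigS out) := by
    rw [foldFill_keys, hke, PySem.Set.update_nil_left]
  have hsub : ∀ e ∈ out, ∀ x ∈ (zipE e).map Prod.fst,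
      x ∈ (out.foldl bFill PySem.Dict.empty).keys := by
    intro e he x hx
    rw [hk1]
    obtain ⟨p, hp', hfst⟩ := List.mem_map.mp hx
    obtain ⟨px, py⟩ := p
    have hxo : x ∈ PySem.List.pyGetD e.2 0 [] := hfst ▸ (List.of_mem_zip hp').1
    exact (PySem.Set.mem_ofList _ _).mpr
      (List.mem_flatMap.mpr ⟨e, he, by
        rw [streamE]; exact List.mem_append_left _ hxo⟩)
  have hkB := foldLink_keys out _ hp hsub
  have hgd : ∀ n, (out.foldl aStep PySem.Dict.empty).getD n [[], []]
      = (out.foldl bLink (out.foldl bFill PySem.Dict.empty)).getD n [[], []] := by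
    intro n
    rw [foldA_getD out _ hp hsh0 n, foldLink_getD out _ hp hsh1 n, foldFill_getD]
  rw [PySem.Dict.items_eq_map_keys _ (by rw [hkA]; exact PySem.Set.nodup_ofList _) [[], []],
    PySem.Dict.items_eq_map_keys _ (by rw [hkB, hk1]; exact PySem.Set.nodup_ofList _) [[], []],
    hkA, hkB, hk1]
  exact List.map_congr_left (fun k _ => by rw [hgd k])

-- ===== VERDICT (by name: the statement is the Claim_ definition above) =====
theorem makeInDict_spec : Claim_equal_makeInDict := by
  intro out _ hpre
  show makeInDict out = makeInDict_alt out
  exact final out (fun e he => hpre e he)
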